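-- pv_equiv track=rewrite | github.com/AnonymitySubmit/DataPool | DataPoolBasicCodeVision2nd/datapool_analysis_overlap.py | rigside_expand
-- ===== SOURCE A (Python) =====
-- def rigside_expand(target, list1, height, width): # 该函数属于oneside_expand的下属函数
--     side_bool = [] # 初始化布尔矩阵
--
--     # 每个目标都对比一遍其他目标测试两者是否相对,并保存布尔列表
--     for i in range(len(list1)): # 遍历其他目标, 判断相对位置
--         if target[3] > list1[i][1] and target[1] < list1[i][3] and target[2] < list1[i][0]: # y2 > y'1 & y1 < y'2 & x2 < x'1
--             side_bool.append(True) # True: 存在目标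
--         else:
--             side_bool.append(False) # False: 不存在目标
--
--     # 将目标与其他目标的布尔列表进行或操作,得到该目标对面是否存在目标
--     rig = False
--     for i in range(len(side_bool)):
--         rig = rig or side_bool[i]
--
--     side_bool = [] # 废物利用该列表
--
--     # 取得目标的右距
--     if rig == True:
--         for i in range(len(list1)):
--             if target[2] < list1[i][0] and target[3] > list1[i][1] and target[1] < list1[i][3]: # x2 < x'1 & y2 > y'1 & y1 < y'2
--                 side_bool.append(list1[i][0] - target[2]) # x'1 - x2
--         return min(side_bool)
--     else:
--         return width - target[2]
-- ===== SOURCE B (Python) =====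
-- def rigside_expand(target, list1, height, width):
--     # sort rectangles by their left edge x'1; the first overlapping one in that
--     # order is the nearest to the right, so return immediately on first match
--     for row in sorted(list1, key=lambda r: r[0]):
--         if target[2] < row[0] and target[3] > row[1] and target[1] < row[3]:
--             return row[0] - target[2]
--     return width - target[2]
-- ===== Notes on version B (the rewrite author's own statement) =====
-- stated objective: alternative
-- what changed: B sorts the rectangles by their left edge and returns on the FIRST overlapping one (earliest left edge = minimal right-distance), replacing A's boolean list, OR-reduction and rescan-then-min passes with sort plus early-exit scan
import Mathlib
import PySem

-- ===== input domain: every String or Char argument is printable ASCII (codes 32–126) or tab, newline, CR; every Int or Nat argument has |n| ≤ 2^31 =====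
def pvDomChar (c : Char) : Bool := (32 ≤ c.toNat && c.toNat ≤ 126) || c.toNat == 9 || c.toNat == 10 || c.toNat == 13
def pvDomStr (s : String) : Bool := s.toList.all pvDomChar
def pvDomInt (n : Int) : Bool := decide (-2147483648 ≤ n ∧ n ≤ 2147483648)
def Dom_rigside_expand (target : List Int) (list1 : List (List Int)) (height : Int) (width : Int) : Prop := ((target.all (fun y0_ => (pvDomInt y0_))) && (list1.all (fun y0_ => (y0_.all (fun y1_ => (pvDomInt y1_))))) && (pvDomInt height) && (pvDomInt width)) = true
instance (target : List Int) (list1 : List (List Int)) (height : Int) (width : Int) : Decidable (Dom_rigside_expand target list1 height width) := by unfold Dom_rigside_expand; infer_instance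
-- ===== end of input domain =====

-- B sorts the rectangles by their left edge and returns on the first overlapping one
-- (earliest left edge = minimal right-distance), replacing A's boolean list, OR-reduction
-- and rescan-then-min passes; an alternative algorithm, not claimed faster.

-- ===== PORT A =====
def rigside_expand (target : List Int) (list1 : List (List Int)) (height : Int) (width : Int) : Int :=
  -- side_bool: one Bool per element of list1
  let sideBool : List Bool := list1.foldl (fun acc row =>
    if PySem.List.pyGetD target 3 0 > PySem.List.pyGetD row 1 0 ∧
       PySem.List.pyGetD target 1 0 < PySem.List.pyGetD row 3 0 ∧
       PySem.List.pyGetD target 2 0 < PySem.List.pyGetD row 0 0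
    then acc ++ [true] else acc ++ [false]) []
  -- rig: OR-reduction of side_bool
  let rig : Bool := sideBool.foldl (fun r b => r || b) false
  if rig = true then
    -- rescan collecting right-distances, then min (nonempty under rig = true)
    let dists : List Int := list1.foldl (fun acc row =>
      if PySem.List.pyGetD target 2 0 < PySem.List.pyGetD row 0 0 ∧
         PySem.List.pyGetD target 3 0 > PySem.List.pyGetD row 1 0 ∧
         PySem.List.pyGetD target 1 0 < PySem.List.pyGetD row 3 0
      then acc ++ [PySem.List.pyGetD row 0 0 - PySem.List.pyGetD target 2 0] else acc) []
    (PySem.List.min? dists (fun x => x)).getD 0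
  else
    width - PySem.List.pyGetD target 2 0

-- ===== PORT B =====
def rigside_expand_alt (target : List Int) (list1 : List (List Int)) (height : Int) (width : Int) : Int :=
  -- sorted(list1, key=lambda r: r[0]); early return on the first overlapping row
  let rows := PySem.List.sorted list1 (fun r => PySem.List.pyGetD r 0 0) false
  match rows.find? (fun row =>
      decide (PySem.List.pyGetD target 2 0 < PySem.List.pyGetD row 0 0 ∧
              PySem.List.pyGetD target 3 0 > PySem.List.pyGetD row 1 0 ∧
              PySem.List.pyGetD target 1 0 < PySem.List.pyGetD row 3 0)) with
  | some row => PySem.List.pyGetD row 0 0 - PySem.List.pyGetD target 2 0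
  | none => width - PySem.List.pyGetD target 2 0

-- ===== PRECONDITION & SPEC =====
-- Exactly the inputs on which Python A returns (no IndexError): target long enough for the
-- indices it reads, each row long enough for index 1, and long enough for index 3 whenever
-- the short-circuit condition target[3] > row[1] reaches it.
def Pre_rigside_expand (target : List Int) (list1 : List (List Int)) (height : Int) (width : Int) : Prop :=
  (list1 = [] → 3 ≤ target.length) ∧ (list1 ≠ [] → 4 ≤ target.length) ∧
  ∀ row ∈ list1, 2 ≤ row.length ∧
    (PySem.List.pyGetD target 3 0 > PySem.List.pyGetD row 1 0 → 4 ≤ row.length)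
instance (target : List Int) (list1 : List (List Int)) (height : Int) (width : Int) : Decidable (Pre_rigside_expand target list1 height width) := by unfold Pre_rigside_expand; infer_instance

def pvWitness_rigside_expand : List Int × List (List Int) × Int × Int :=
  ([0, 1, 2, 3], [[4, 0, 0, 9]], 10, 20)

def Spec_rigside_expand (target : List Int) (list1 : List (List Int)) (height : Int) (width : Int) (out : Int) : Prop := out = rigside_expand_alt target list1 height width
instance (target : List Int) (list1 : List (List Int)) (height : Int) (width : Int) (out : Int) : Decidable (Spec_rigside_expand target list1 height width out) := by unfold Spec_rigside_expand; infer_instance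

-- ===== CLAIM (what is proved, stated in full; the proofs are below) =====
def Claim_equal_rigside_expand : Prop := ∀ (target : List Int) (list1 : List (List Int)) (height : Int) (width : Int), Dom_rigside_expand target list1 height width → Pre_rigside_expand target list1 height width → Spec_rigside_expand target list1 height width (rigside_expand target list1 height width)

-- ===== LEMMAS AND PROOFS =====

-- A's boolean list is the map of its condition over list1
lemma sideBool_eq_map (p : List Int → Prop) [DecidablePred p] (l : List (List Int)) :
    l.foldl (fun acc row => if p row then acc ++ [true] else acc ++ [false]) [] =
      l.map (fun row => decide (p row)) := by
  have h : ∀ (l : List (List Int)) (acc : List Bool),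
      l.foldl (fun acc row => if p row then acc ++ [true] else acc ++ [false]) acc =
        acc ++ l.map (fun row => decide (p row)) := by
    intro l
    induction l with
    | nil => simp
    | cons h t ih =>
      intro acc
      by_cases hp : p h <;> simp [hp, ih, List.append_assoc]
  simpa using h l []

-- OR-reduction of a Bool list is `any`
lemma foldl_or_eq_any (bs : List Bool) (a : Bool) :
    bs.foldl (fun r b => r || b) a = (a || bs.any id) := by
  induction bs generalizing a with
  | nil => simp
  | cons h t ih => simp [List.foldl_cons, ih, Bool.or_assoc]

-- A's collected distances are filter-then-map
lemma dists_eq_filter_map (p : List Int → Prop) [DecidablePred p] (v : List Int → Int)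
    (l : List (List Int)) :
    l.foldl (fun acc row => if p row then acc ++ [v row] else acc) [] =
      (l.filter (fun row => decide (p row))).map v := by
  have h : ∀ (l : List (List Int)) (acc : List Int),
      l.foldl (fun acc row => if p row then acc ++ [v row] else acc) acc =
        acc ++ (l.filter (fun row => decide (p row))).map v := by
    intro l
    induction l with
    | nil => simp
    | cons h t ih =>
      intro acc
      by_cases hp : p h <;> simp [hp, ih]
  simpa using h l []

-- first match in a key-sorted list has minimal key among all matches
lemma find?_sorted_min (key : List Int → Int) (q : List Int → Bool)
    (s : List (List Int)) (hp : s.Pairwise (fun a b => key a ≤ key b))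
    (row : List Int) (h : s.find? q = some row) :
    q row = true ∧ row ∈ s ∧ ∀ y ∈ s, q y = true → key row ≤ key y := by
  induction s with
  | nil => simp at h
  | cons a t ih =>
    rcases List.pairwise_cons.mp hp with ⟨ha, hpt⟩
    by_cases hq : q a = true
    · simp only [List.find?_cons, hq, Option.some.injEq] at h
      cases h
      refine ⟨hq, List.mem_cons_self, ?_⟩
      intro y hy _
      rcases List.mem_cons.mp hy with rfl | hy
      · exact le_refl _
      · exact ha y hy
    · simp only [List.find?_cons, show q a = false from by simpa using hq] at h
      rcases ih hpt h with ⟨h1, h2, h3⟩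
      refine ⟨h1, List.mem_cons_of_mem _ h2, ?_⟩
      intro y hy hqy
      rcases List.mem_cons.mp hy with rfl | hy
      · exact absurd hqy hq
      · exact h3 y hy hqy

-- The two orderings of the overlap condition agree
lemma cond_iff (t1 t2 t3 a b c : Int) :
    (t3 > b ∧ t1 < c ∧ t2 < a) ↔ (t2 < a ∧ t3 > b ∧ t1 < c) := by tauto

-- ===== VERDICT (by name: the statement is the Claim_ definition above) =====
theorem rigside_expand_spec : Claim_equal_rigside_expand := by
  intro target list1 height width _ _
  unfold Spec_rigside_expand rigside_expand rigside_expand_alt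
  set t1 := PySem.List.pyGetD target 1 0
  set t2 := PySem.List.pyGetD target 2 0
  set t3 := PySem.List.pyGetD target 3 0
  set key : List Int → Int := fun r => PySem.List.pyGetD r 0 0 with hkey
  set q : List Int → Bool := fun row => decide (t2 < PySem.List.pyGetD row 0 0 ∧
      t3 > PySem.List.pyGetD row 1 0 ∧ t1 < PySem.List.pyGetD row 3 0) with hq
  -- rewrite A's first loop condition into q's ordering
  have hfun : (fun (acc : List Bool) row =>
      if t3 > PySem.List.pyGetD row 1 0 ∧ t1 < PySem.List.pyGetD row 3 0 ∧
        t2 < PySem.List.pyGetD row 0 0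
      then acc ++ [true] else acc ++ [false]) =
      (fun acc row =>
        if t2 < PySem.List.pyGetD row 0 0 ∧ t3 > PySem.List.pyGetD row 1 0 ∧
          t1 < PySem.List.pyGetD row 3 0
        then acc ++ [true] else acc ++ [false]) := by
    funext acc row
    have := cond_iff t1 t2 t3 (PySem.List.pyGetD row 0 0) (PySem.List.pyGetD row 1 0)
      (PySem.List.pyGetD row 3 0)
    by_cases hc : t2 < PySem.List.pyGetD row 0 0 ∧ t3 > PySem.List.pyGetD row 1 0 ∧
        t1 < PySem.List.pyGetD row 3 0
    · rw [if_pos (this.mpr hc), if_pos hc]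
    · rw [if_neg (fun hx => hc (this.mp hx)), if_neg hc]
  simp only []
  rw [hfun]
  rw [sideBool_eq_map (fun row => t2 < PySem.List.pyGetD row 0 0 ∧
      t3 > PySem.List.pyGetD row 1 0 ∧ t1 < PySem.List.pyGetD row 3 0) list1,
    foldl_or_eq_any,
    dists_eq_filter_map (fun row => t2 < PySem.List.pyGetD row 0 0 ∧
      t3 > PySem.List.pyGetD row 1 0 ∧ t1 < PySem.List.pyGetD row 3 0)
      (fun row => PySem.List.pyGetD row 0 0 - t2) list1]
  simp only [Bool.false_or, List.any_map, Function.comp_def, id]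
  -- the sorted list on B's side
  set s := PySem.List.sorted list1 key false with hs
  have hperm : s.Perm list1 := PySem.List.sorted_perm list1 key false
  have hpw : s.Pairwise (fun a b => key a ≤ key b) :=
    PySem.List.sorted_pairwise list1 key
  by_cases hany : list1.any q = true
  · rw [if_pos hany]
    -- B's find? succeeds
    obtain ⟨r0, hr0mem, hr0q⟩ := List.any_eq_true.mp hany
    have hsome : (s.find? q).isSome := by
      rw [List.find?_isSome]
      exact ⟨r0, hperm.mem_iff.mpr hr0mem, hr0q⟩
    obtain ⟨row, hrow⟩ := Option.isSome_iff_exists.mp hsome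
    rcases find?_sorted_min key q s hpw row hrow with ⟨hqrow, hrowmem, hmin⟩
    -- A's min? succeeds
    set M := (list1.filter q).map (fun row => PySem.List.pyGetD row 0 0 - t2) with hM
    have hMne : M ≠ [] := by
      simp only [hM, ne_eq, List.map_eq_nil_iff, List.filter_eq_nil_iff]
      exact fun hall => by simp [hall r0 hr0mem] at hr0q
    obtain ⟨m, hm⟩ := Option.ne_none_iff_exists'.mp
      (fun hnone => hMne ((PySem.List.min?_eq_none_iff M (fun x => x)).mp hnone))
    have hmmem : m ∈ M := PySem.List.min?_mem hm
    have hmmin : ∀ y ∈ M, m ≤ y := by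
      intro y hy; exact PySem.List.min?_isMin hm y hy
    -- v row ∈ M
    have hvmem : key row - t2 ∈ M := by
      simp only [hM, List.mem_map]
      exact ⟨row, List.mem_filter.mpr ⟨hperm.mem_iff.mp hrowmem, hqrow⟩, rfl⟩
    -- v row ≤ m
    have hvle : key row - t2 ≤ m := by
      simp only [hM, List.mem_map] at hmmem
      obtain ⟨y, hy, rfl⟩ := hmmem
      have hymem : y ∈ s := hperm.mem_iff.mpr (List.mem_filter.mp hy).1
      have := hmin y hymem (List.mem_filter.mp hy).2
      simp only [hkey] at this ⊢
      omega
    have : m = key row - t2 := le_antisymm (hmmin _ hvmem) hvle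
    simp only [hkey] at this
    rw [hrow, hm, Option.getD_some, this]
  · rw [if_neg hany]
    have hnone : s.find? q = none := by
      rw [List.find?_eq_none]
      intro x hx
      simp only [List.any_eq_true, not_exists, not_and, Bool.not_eq_true] at hany
      simp [hany x (hperm.mem_iff.mp hx)]
    rw [hnone]
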